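-- pv_equiv track=rewrite | github.com/GhostMeshIO/Anti-Gravity-RND | The Archimedes Experiment/sim2_topological_stability.py | partition_lattice_for_coherence
-- ===== SOURCE A (Python) =====
-- from typing import Dict, List, Tuple, Any
--
-- def partition_lattice_for_coherence(size: int) -> Dict[str, List[int]]:
--     """
--     Partition into boundary and interior for coherence conservation tracking.
--     CI_B = boundary coherence (perimeter qubits)
--     CI_C = continuum coherence (interior qubits)
--     """
--     boundary = []
--     interior = []
--     for r in range(size):
--         for c in range(size):
--             idx = r * size + c
--             if r == 0 or r == size - 1 or c == 0 or c == size - 1: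
--                 boundary.append(idx)
--             else:
--                 interior.append(idx)
--
--     return {
--         'boundary': boundary,
--         'interior': interior,
--         'all': list(range(size * size)),
--     }
-- ===== SOURCE B (Python) =====
-- def partition_lattice_for_coherence(size: int):
--     """Build boundary directly from perimeter geometry (top row, side columns,
--     bottom row) and interior from the inner (size-2)x(size-2) block, instead
--     of scanning every cell and branching."""
--     top = list(range(size))
--     sides = []
--     for r in range(1, size - 1):
--         sides.append(r * size)
--         sides.append(r * size + (size - 1))
--     bottom = [(size - 1) * size + c for c in range(size)] if size > 1 else []
--     interior = [r * size + c for r in range(1, size - 1) for c in range(1, size - 1)]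
--     return {
--         'boundary': top + sides + bottom,
--         'interior': interior,
--         'all': list(range(size * size)),
--     }
-- ===== Notes on version B (the rewrite author's own statement) =====
-- stated objective: alternative
-- what changed: Replaces the per-cell boundary-test scan of the whole lattice by direct construction of the perimeter (top row, then the two end indices of each middle row, then the guarded bottom row) and of the inner block, in A's exact emission order.
import Mathlib
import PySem

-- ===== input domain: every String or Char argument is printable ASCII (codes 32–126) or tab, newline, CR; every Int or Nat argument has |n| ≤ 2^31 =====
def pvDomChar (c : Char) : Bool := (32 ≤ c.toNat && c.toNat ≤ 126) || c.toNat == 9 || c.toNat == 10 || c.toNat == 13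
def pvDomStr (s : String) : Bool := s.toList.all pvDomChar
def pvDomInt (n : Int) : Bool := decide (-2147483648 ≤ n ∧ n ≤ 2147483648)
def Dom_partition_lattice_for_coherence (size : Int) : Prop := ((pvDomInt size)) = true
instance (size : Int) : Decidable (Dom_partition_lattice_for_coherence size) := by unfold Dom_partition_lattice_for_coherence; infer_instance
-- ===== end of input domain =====

-- B builds the boundary directly from perimeter geometry (top row, middle-row end pairs,
-- guarded bottom row) and the interior from the inner block, instead of A's per-cell branch scan.


-- ===== PORT A =====
def partition_lattice_for_coherence (size : Int) : List (String × List Int) :=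
  let st := (PySem.List.pyRange 0 size 1).foldl (fun (bi : List Int × List Int) r =>
    (PySem.List.pyRange 0 size 1).foldl (fun (bi : List Int × List Int) c =>
      let idx := r * size + c
      if r = 0 ∨ r = size - 1 ∨ c = 0 ∨ c = size - 1 then (bi.1 ++ [idx], bi.2)
      else (bi.1, bi.2 ++ [idx])) bi) ([], [])
  [("boundary", st.1), ("interior", st.2), ("all", PySem.List.pyRange 0 (size * size) 1)]

-- ===== PORT B =====
def partition_lattice_for_coherence_alt (size : Int) : List (String × List Int) :=
  let top := PySem.List.pyRange 0 size 1
  let sides := (PySem.List.pyRange 1 (size - 1) 1).foldl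
    (fun acc r => acc ++ [r * size] ++ [r * size + (size - 1)]) []
  let bottom := if 1 < size then (PySem.List.pyRange 0 size 1).map (fun c => (size - 1) * size + c) else []
  let interior := (PySem.List.pyRange 1 (size - 1) 1).flatMap
    (fun r => (PySem.List.pyRange 1 (size - 1) 1).map (fun c => r * size + c))
  [("boundary", top ++ sides ++ bottom), ("interior", interior), ("all", PySem.List.pyRange 0 (size * size) 1)]

-- ===== PRECONDITION & SPEC =====
def Spec_partition_lattice_for_coherence (size : Int) (out : List (String × List Int)) : Prop := out = partition_lattice_for_coherence_alt size
instance (size : Int) (out : List (String × List Int)) : Decidable (Spec_partition_lattice_for_coherence size out) := by unfold Spec_partition_lattice_for_coherence; infer_instance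

-- ===== CLAIM (what is proved, stated in full; the proofs are below) =====
def Claim_equal_partition_lattice_for_coherence : Prop := ∀ (size : Int), Dom_partition_lattice_for_coherence size → Spec_partition_lattice_for_coherence size (partition_lattice_for_coherence size)

-- ===== LEMMAS AND PROOFS =====

/-- The boundary indices A's inner column loop emits for row `r`. -/
def pvG (size r : Int) : List Int :=
  (PySem.List.pyRange 0 size 1).flatMap
    (fun c => if r = 0 ∨ r = size - 1 ∨ c = 0 ∨ c = size - 1 then [r * size + c] else [])

/-- The interior indices A's inner column loop emits for row `r`. -/
def pvH (size r : Int) : List Int :=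
  (PySem.List.pyRange 0 size 1).flatMap
    (fun c => if r = 0 ∨ r = size - 1 ∨ c = 0 ∨ c = size - 1 then [] else [r * size + c])

/-- A fold that appends `g x` to the first and `h x` to the second component
collects the two flatMaps. -/
theorem pv_foldl_pair_append (g h : Int → List Int) (l : List Int) (b i : List Int) :
    l.foldl (fun (st : List Int × List Int) x => (st.1 ++ g x, st.2 ++ h x)) (b, i)
      = (b ++ l.flatMap g, i ++ l.flatMap h) := by
  induction l generalizing b i with
  | nil => simp
  | cons x xs ih => simp [List.foldl_cons, ih]

/-- A fold that routes `f x` into the first or second component by a test. -/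
theorem pv_foldl_pair_if (p : Int → Prop) [DecidablePred p] (f : Int → Int) (l : List Int)
    (b i : List Int) :
    l.foldl (fun (st : List Int × List Int) x =>
        if p x then (st.1 ++ [f x], st.2) else (st.1, st.2 ++ [f x])) (b, i)
      = (b ++ l.flatMap (fun x => if p x then [f x] else []),
         i ++ l.flatMap (fun x => if p x then [] else [f x])) := by
  induction l generalizing b i with
  | nil => simp
  | cons x xs ih =>
    by_cases h : p x <;> simp [List.foldl_cons, h, ih]

theorem pv_flatMap_ite_true (p : Int → Prop) [DecidablePred p] (f g : Int → List Int)
    (l : List Int) (h : ∀ x ∈ l, p x) :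
    l.flatMap (fun x => if p x then f x else g x) = l.flatMap f := by
  induction l with
  | nil => simp
  | cons x xs ih =>
    simp [List.flatMap_cons, if_pos (h x (by simp)), ih (fun y hy => h y (by simp [hy]))]

theorem pv_flatMap_ite_false (p : Int → Prop) [DecidablePred p] (f g : Int → List Int)
    (l : List Int) (h : ∀ x ∈ l, ¬ p x) :
    l.flatMap (fun x => if p x then f x else g x) = l.flatMap g := by
  induction l with
  | nil => simp
  | cons x xs ih =>
    simp [List.flatMap_cons, if_neg (h x (by simp)), ih (fun y hy => h y (by simp [hy]))]

theorem pv_flatMap_singleton (f : Int → Int) (l : List Int) :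
    l.flatMap (fun x => [f x]) = l.map f := by
  induction l with
  | nil => simp
  | cons x xs ih => simp [List.flatMap_cons, ih]

theorem pv_flatMap_congr (f g : Int → List Int) (l : List Int) (h : ∀ x ∈ l, f x = g x) :
    l.flatMap f = l.flatMap g := by
  induction l with
  | nil => simp
  | cons x xs ih =>
    simp [List.flatMap_cons, h x (by simp), ih (fun y hy => h y (by simp [hy]))]

/-- A's double scan collected row by row. -/
theorem pv_A_fold (size : Int) :
    (PySem.List.pyRange 0 size 1).foldl (fun (bi : List Int × List Int) r =>
      (PySem.List.pyRange 0 size 1).foldl (fun (bi : List Int × List Int) c =>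
        let idx := r * size + c
        if r = 0 ∨ r = size - 1 ∨ c = 0 ∨ c = size - 1 then (bi.1 ++ [idx], bi.2)
        else (bi.1, bi.2 ++ [idx])) bi) ([], [])
      = ((PySem.List.pyRange 0 size 1).flatMap (pvG size),
         (PySem.List.pyRange 0 size 1).flatMap (pvH size)) := by
  have hstep : (fun (bi : List Int × List Int) r =>
      (PySem.List.pyRange 0 size 1).foldl (fun (bi : List Int × List Int) c =>
        let idx := r * size + c
        if r = 0 ∨ r = size - 1 ∨ c = 0 ∨ c = size - 1 then (bi.1 ++ [idx], bi.2)
        else (bi.1, bi.2 ++ [idx])) bi)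
      = (fun (bi : List Int × List Int) r => (bi.1 ++ pvG size r, bi.2 ++ pvH size r)) := by
    funext bi r
    cases bi with
    | mk b i =>
      exact pv_foldl_pair_if (fun c => r = 0 ∨ r = size - 1 ∨ c = 0 ∨ c = size - 1)
        (fun c => r * size + c) _ b i
  rw [hstep, pv_foldl_pair_append]
  simp

/-- On a row that is top or bottom, the whole row is boundary. -/
theorem pvG_edge (size r : Int) (hr : r = 0 ∨ r = size - 1) :
    pvG size r = (PySem.List.pyRange 0 size 1).map (fun c => r * size + c) := by
  unfold pvG
  rw [pv_flatMap_ite_true _ _ _ _ (fun c _ => by rcases hr with h | h <;> simp [h])]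
  exact pv_flatMap_singleton _ _

theorem pvH_edge (size r : Int) (hr : r = 0 ∨ r = size - 1) : pvH size r = [] := by
  unfold pvH
  rw [pv_flatMap_ite_true _ _ _ _ (fun c _ => by rcases hr with h | h <;> simp [h])]
  simp

/-- Row split for `size ≥ 2`: first row, middle rows, last row. -/
theorem pv_rows_split (size : Int) (h2 : 2 ≤ size) :
    PySem.List.pyRange 0 size 1 = 0 :: (PySem.List.pyRange 1 (size - 1) 1 ++ [size - 1]) := by
  rw [PySem.List.pyRange_one_cons (by omega : (0:Int) < size)]
  simp only [zero_add]
  rw [PySem.List.pyRange_one_append 1 (size - 1) size (by omega) (by omega),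
      (by omega : size = (size - 1) + 1), PySem.List.pyRange_one_succ_right (by omega)]
  simp

/-- On a middle row only the two end columns are boundary. -/
theorem pvG_mid (size r : Int) (h2 : 2 ≤ size) (hr1 : 1 ≤ r) (hr2 : r < size - 1) :
    pvG size r = [r * size, r * size + (size - 1)] := by
  unfold pvG
  have hrne0 : r ≠ 0 := by omega
  have hrnel : r ≠ size - 1 := by omega
  rw [pv_rows_split size h2]
  simp only [List.flatMap_cons, List.flatMap_append]
  rw [pv_flatMap_ite_false _ _ _ _ (fun c hc => by
    have := (PySem.List.mem_pyRange_one).1 hc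
    simp only [not_or]
    refine ⟨hrne0, hrnel, by omega, by omega⟩)]
  simp [hrne0, hrnel]

theorem pvH_mid (size r : Int) (h2 : 2 ≤ size) (hr1 : 1 ≤ r) (hr2 : r < size - 1) :
    pvH size r = (PySem.List.pyRange 1 (size - 1) 1).map (fun c => r * size + c) := by
  unfold pvH
  have hrne0 : r ≠ 0 := by omega
  have hrnel : r ≠ size - 1 := by omega
  rw [pv_rows_split size h2]
  simp only [List.flatMap_cons, List.flatMap_append]
  rw [pv_flatMap_ite_false _ _ _ _ (fun c hc => by
    have := (PySem.List.mem_pyRange_one).1 hc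
    simp only [not_or]
    refine ⟨hrne0, hrnel, by omega, by omega⟩)]
  simp [hrne0, hrnel]
  exact pv_flatMap_singleton _ _

/-- A's collected boundary equals B's perimeter construction, `size ≥ 2`. -/
theorem pv_boundary_eq (size : Int) (h2 : 2 ≤ size) :
    (PySem.List.pyRange 0 size 1).flatMap (pvG size)
      = PySem.List.pyRange 0 size 1
        ++ (PySem.List.pyRange 1 (size - 1) 1).foldl
            (fun acc r => acc ++ [r * size] ++ [r * size + (size - 1)]) []
        ++ (PySem.List.pyRange 0 size 1).map (fun c => (size - 1) * size + c) := by
  have hsides : (PySem.List.pyRange 1 (size - 1) 1).foldl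
      (fun acc r => acc ++ [r * size] ++ [r * size + (size - 1)]) []
      = (PySem.List.pyRange 1 (size - 1) 1).flatMap
          (fun r => [r * size, r * size + (size - 1)]) := by
    have e1 : (PySem.List.pyRange 1 (size - 1) 1).foldl
        (fun acc r => acc ++ [r * size] ++ [r * size + (size - 1)]) []
        = (PySem.List.pyRange 1 (size - 1) 1).foldl
            (fun acc r => acc ++ [r * size, r * size + (size - 1)]) [] := by
      apply PySem.List.foldl_congr_mem
      intro acc x _
      simp
    rw [e1, PySem.List.foldl_append_eq_flatMap, List.nil_append]
  conv_lhs => rw [pv_rows_split size h2]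
  simp only [List.flatMap_cons, List.flatMap_append, List.flatMap_cons, List.flatMap_nil,
    List.append_nil]
  rw [pvG_edge size 0 (Or.inl rfl), pvG_edge size (size - 1) (Or.inr rfl),
      pv_flatMap_congr (pvG size) (fun r => [r * size, r * size + (size - 1)]) _
        (fun r hr => by
          have := (PySem.List.mem_pyRange_one).1 hr
          exact pvG_mid size r h2 this.1 this.2),
      hsides]
  simp [List.append_assoc]

/-- A's collected interior equals B's inner block, `size ≥ 2`. -/
theorem pv_interior_eq (size : Int) (h2 : 2 ≤ size) :
    (PySem.List.pyRange 0 size 1).flatMap (pvH size)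
      = (PySem.List.pyRange 1 (size - 1) 1).flatMap
          (fun r => (PySem.List.pyRange 1 (size - 1) 1).map (fun c => r * size + c)) := by
  conv_lhs => rw [pv_rows_split size h2]
  simp only [List.flatMap_cons, List.flatMap_append, List.flatMap_nil, List.append_nil]
  rw [pvH_edge size 0 (Or.inl rfl), pvH_edge size (size - 1) (Or.inr rfl),
      pv_flatMap_congr (pvH size)
        (fun r => (PySem.List.pyRange 1 (size - 1) 1).map (fun c => r * size + c)) _
        (fun r hr => by
          have := (PySem.List.mem_pyRange_one).1 hr
          exact pvH_mid size r h2 this.1 this.2)]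
  simp

-- ===== VERDICT (by name: the statement is the Claim_ definition above) =====
theorem partition_lattice_for_coherence_spec : Claim_equal_partition_lattice_for_coherence := by
  intro size _
  show partition_lattice_for_coherence size = partition_lattice_for_coherence_alt size
  unfold partition_lattice_for_coherence partition_lattice_for_coherence_alt
  rw [pv_A_fold]
  by_cases hle : size ≤ 0
  · simp [PySem.List.pyRange_one_eq_nil, hle, (by omega : size - 1 ≤ 1)]
  by_cases h1 : size = 1
  · subst h1; decide
  have h2 : 2 ≤ size := by omega
  rw [pv_boundary_eq size h2, pv_interior_eq size h2, if_pos (by omega : (1:Int) < size)]
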